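-- pv_equiv track=rewrite | github.com/C1Z4/ourHour | ourHour-chatbot/app/services/context_service.py | _group_members_by_department
-- ===== SOURCE A (Python) =====
-- from typing import Dict, List, Any, Optional
--
-- def _group_members_by_department(members: List[Dict[str, Any]]) -> Dict[str, List[str]]:
--     """부서별 멤버 그룹핑"""
--     dept_groups = {}
--     for member in members:
--         dept = member['department']
--         if dept not in dept_groups:
--             dept_groups[dept] = []
--         dept_groups[dept].append(member['name'])
--     return dept_groups
-- ===== SOURCE B (Python) =====
-- from typing import Dict, List, Any
--
--
-- def _group_members_by_department(members: List[Dict[str, Any]]) -> Dict[str, List[str]]: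
--     """부서별 멤버 그룹핑 (ordered dedup of departments, then one filter pass per department)"""
--     depts = list(dict.fromkeys(member['department'] for member in members))
--     return {
--         dept: [member['name'] for member in members if member['department'] == dept]
--         for dept in depts
--     }
-- ===== Notes on version B (the rewrite author's own statement) =====
-- stated objective: alternative
-- what changed: Replaces the single-pass hash accumulation by first computing the distinct departments in first-occurrence order with dict.fromkeys and then building each group with a separate filtering pass over the members.
import Mathlib
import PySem

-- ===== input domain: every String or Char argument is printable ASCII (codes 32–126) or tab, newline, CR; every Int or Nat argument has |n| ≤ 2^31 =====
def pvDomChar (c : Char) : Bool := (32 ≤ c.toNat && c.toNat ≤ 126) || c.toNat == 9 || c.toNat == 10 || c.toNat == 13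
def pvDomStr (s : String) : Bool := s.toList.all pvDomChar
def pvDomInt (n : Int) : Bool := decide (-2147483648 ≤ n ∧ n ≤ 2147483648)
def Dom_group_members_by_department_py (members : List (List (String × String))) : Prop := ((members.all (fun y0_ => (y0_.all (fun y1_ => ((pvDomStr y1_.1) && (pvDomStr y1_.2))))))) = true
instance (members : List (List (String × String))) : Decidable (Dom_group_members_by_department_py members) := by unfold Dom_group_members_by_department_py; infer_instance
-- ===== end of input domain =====

-- B replaces A's hash-accumulate single pass by an ordered dedup of the department
-- values followed by one filter pass per department (objective: alternative).

-- ===== PORT A =====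
-- member['department'] / member['name'] raise KeyError when the key is missing;
-- those inputs are excluded by Pre_ below, so the `.getD ""` default is never claimed about.
def group_members_by_department_py (members : List (List (String × String))) : List (String × List String) :=
  (members.foldl
    (fun dept_groups member =>
      let m : PySem.Dict String String := PySem.Dict.mk member
      let dept := (m.get? "department").getD ""
      let dept_groups := if dept_groups.contains dept then dept_groups
                         else dept_groups.insert dept ([] : List String)
      dept_groups.modify dept [] (fun names => names ++ [(m.get? "name").getD ""]))
    PySem.Dict.empty).items

-- ===== PORT B =====
def group_members_by_department_py_alt (members : List (List (String × String))) : List (String × List String) :=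
  let dept_of := fun (m : List (String × String)) => ((PySem.Dict.mk m).get? "department").getD ""
  let depts := PySem.List.dedup (members.map dept_of)
  depts.map (fun d =>
    (d, (members.filter (fun m => dept_of m == d)).map
          (fun m => ((PySem.Dict.mk m).get? "name").getD "")))

-- ===== PRECONDITION & SPEC =====
-- Pre_ excludes exactly the inputs where Python A raises KeyError: a member missing
-- the 'department' or 'name' key.
def Pre_group_members_by_department_py (members : List (List (String × String))) : Prop :=
  ∀ m ∈ members, (PySem.Dict.mk m).contains "department" = true ∧ (PySem.Dict.mk m).contains "name" = true
instance (members : List (List (String × String))) : Decidable (Pre_group_members_by_department_py members) := by unfold Pre_group_members_by_department_py; infer_instance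

def pvWitness_group_members_by_department_py : (List (List (String × String))) :=
  [[("department", "eng"), ("name", "kim")], [("department", "hr"), ("name", "lee")], [("department", "eng"), ("name", "park")]]

def Spec_group_members_by_department_py (members : List (List (String × String))) (out : List (String × List String)) : Prop := out = group_members_by_department_py_alt members
instance (members : List (List (String × String))) (out : List (String × List String)) : Decidable (Spec_group_members_by_department_py members out) := by unfold Spec_group_members_by_department_py; infer_instance

-- ===== CLAIM (what is proved, stated in full; the proofs are below) =====
def Claim_equal_group_members_by_department_py : Prop := ∀ (members : List (List (String × String))), Dom_group_members_by_department_py members → Pre_group_members_by_department_py members → Spec_group_members_by_department_py members (group_members_by_department_py members)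

-- ===== LEMMAS AND PROOFS =====

-- one loop step of A equals a single modify (setdefault-then-append = append-with-default)
theorem pv_step_eq (acc : PySem.Dict String (List String)) (k : String) (v : String) :
    (if acc.contains k then acc else acc.insert k []).modify k [] (· ++ [v])
      = acc.modify k [] (· ++ [v]) := by
  by_cases h : acc.contains k
  · simp [h]
  · have h' : acc.contains k = false := by simpa using h
    have hk : ∀ p ∈ acc.items, p.1 ≠ k := by
      intro p hp hpk
      have : p.1 ∈ acc.keys := PySem.Dict.mem_keys_of_mem_items acc hp
      rw [hpk, ← PySem.Dict.contains_iff_mem_keys] at this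
      simp [h'] at this
    have hg : acc.getD k [] = [] := PySem.Dict.getD_of_not_contains acc [] h'
    simp [h, PySem.Dict.modify, PySem.Dict.insert]
    refine ⟨?_, ?_⟩
    · exact (List.map_congr_left (fun p hp => by simp [hk p hp])).trans (List.map_id _)
    · rw [hg]
      have he : ({ items := acc.items ++ [(k, [])] } : PySem.Dict String (List String)) = acc.insert k [] := by
        apply PySem.Dict.ext
        rw [PySem.Dict.items_insert_of_not_contains (h := h')]
      rw [he, PySem.Dict.getD_insert_self]

-- ===== VERDICT (by name: the statement is the Claim_ definition above) =====
theorem group_members_by_department_py_spec : Claim_equal_group_members_by_department_py := by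
  intro members _ _
  unfold Spec_group_members_by_department_py group_members_by_department_py group_members_by_department_py_alt
  set dep := fun (m : List (String × String)) => ((PySem.Dict.mk m).get? "department").getD "" with hdep
  set nm := fun (m : List (String × String)) => ((PySem.Dict.mk m).get? "name").getD "" with hnm
  -- collapse each loop step to one modify
  have h1 : members.foldl
      (fun dept_groups member =>
        (if dept_groups.contains (dep member) then dept_groups
         else dept_groups.insert (dep member) ([] : List String)).modify (dep member) []
          (fun names => names ++ [nm member]))
      PySem.Dict.empty
      = (members.map (fun m => (dep m, nm m))).foldl
          (fun d p => d.modify p.1 [] (· ++ [p.2])) PySem.Dict.empty := by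
    have hf : (fun (dept_groups : PySem.Dict String (List String)) (member : List (String × String)) =>
        (if dept_groups.contains (dep member) then dept_groups
         else dept_groups.insert (dep member) ([] : List String)).modify (dep member) []
          (fun names => names ++ [nm member]))
        = fun dept_groups member => dept_groups.modify (dep member) [] (· ++ [nm member]) :=
      funext fun acc => funext fun member => pv_step_eq acc (dep member) (nm member)
    rw [hf, List.foldl_map]
  simp only []
  rw [h1]
  have hnd : ((members.map fun m => (dep m, nm m)).foldl
      (fun d p => d.modify p.1 [] (· ++ [p.2])) PySem.Dict.empty).keys.Nodup := by
    apply PySem.Dict.nodup_keys_foldl_modify_key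
    exact PySem.Dict.nodup_keys_empty
  rw [PySem.Dict.items_eq_map_keys _ hnd []]
  simp [PySem.Dict.keys_foldl_modify_key, PySem.Dict.getD_foldl_modify_append,
        List.filter_map, List.map_map, PySem.Set.update, PySem.Set.ofList,
        PySem.List.dedup_eq_ofList, Function.comp_def]
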